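-- pv_equiv track=rewrite | github.com/nico-espinosadice/abductive-theory | sde.py | calculate_union_1
-- ===== SOURCE A (Python) =====
-- def calculate_intersection(graph, children_a, children_b):
--     inter = 0
--     for i in children_a:
--         if i in children_b:
--             if children_a[i] < children_b[i]:
--                 inter += children_a[i]
--             else:
--                 inter += children_b[i]
--     return inter
--
-- def calculate_union_1(graph, children_a, children_b):
--     union = 0
--     for i in children_a:
--         union += children_a[i]
--     for i in children_b:
--         union += children_b[i]
--     union -= calculate_intersection(graph, children_a, children_b)
--     return union
-- ===== SOURCE B (Python) =====
-- def calculate_union_1(graph, children_a, children_b):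
--     total = 0
--     for k in children_a.keys() | children_b.keys():
--         if k in children_a:
--             if k in children_b:
--                 total += max(children_a[k], children_b[k])
--             else:
--                 total += children_a[k]
--         else:
--             total += children_b[k]
--     return total
-- ===== Notes on version B (the rewrite author's own statement) =====
-- stated objective: alternative
-- what changed: One pass over the union of the two key sets adding per-key max (or the single present value), replacing A's three loops (sum dict a, sum dict b, subtract a min-based intersection helper).
import Mathlib
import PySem

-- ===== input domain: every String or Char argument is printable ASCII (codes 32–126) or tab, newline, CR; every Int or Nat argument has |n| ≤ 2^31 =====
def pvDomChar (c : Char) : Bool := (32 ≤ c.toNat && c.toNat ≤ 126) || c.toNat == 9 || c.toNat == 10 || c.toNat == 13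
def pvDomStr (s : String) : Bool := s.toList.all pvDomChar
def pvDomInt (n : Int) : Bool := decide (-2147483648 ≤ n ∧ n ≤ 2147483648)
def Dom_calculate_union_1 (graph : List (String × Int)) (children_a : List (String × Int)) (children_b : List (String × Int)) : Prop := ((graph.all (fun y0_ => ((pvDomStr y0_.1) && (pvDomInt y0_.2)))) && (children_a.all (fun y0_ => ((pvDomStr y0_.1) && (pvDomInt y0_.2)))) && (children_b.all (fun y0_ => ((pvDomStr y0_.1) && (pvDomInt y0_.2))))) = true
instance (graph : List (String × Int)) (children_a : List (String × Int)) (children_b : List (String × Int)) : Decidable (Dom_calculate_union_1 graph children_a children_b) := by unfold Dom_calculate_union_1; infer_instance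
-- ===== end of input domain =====

-- B replaces A's three loops (sum dict a, sum dict b, subtract a min-based intersection) by one pass over the union of the key sets adding the per-key max / sole present value (objective: alternative decomposition, same cost).


-- ===== PORT A =====
def calculate_intersection (graph : List (String × Int)) (children_a : PySem.Dict String Int) (children_b : PySem.Dict String Int) : Int :=
  children_a.keys.foldl (fun inter i =>
    if children_b.contains i then
      if children_a.getD i 0 < children_b.getD i 0 then inter + children_a.getD i 0
      else inter + children_b.getD i 0
    else inter) 0

def calculate_union_1 (graph : List (String × Int)) (children_a : List (String × Int)) (children_b : List (String × Int)) : Int :=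
  let da := PySem.Dict.ofList children_a
  let db := PySem.Dict.ofList children_b
  let u1 := da.keys.foldl (fun u i => u + da.getD i 0) 0
  let u2 := db.keys.foldl (fun u i => u + db.getD i 0) 0
  u1 + u2 - calculate_intersection graph da db

-- ===== PORT B =====
def calculate_union_1_alt (graph : List (String × Int)) (children_a : List (String × Int)) (children_b : List (String × Int)) : Int :=
  let da := PySem.Dict.ofList children_a
  let db := PySem.Dict.ofList children_b
  (PySem.Set.union (PySem.Set.ofList da.keys) db.keys).foldl (fun t k =>
    if da.contains k then
      if db.contains k then t + max (da.getD k 0) (db.getD k 0)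
      else t + da.getD k 0
    else t + db.getD k 0) 0

-- ===== PRECONDITION & SPEC =====
def Spec_calculate_union_1 (graph : List (String × Int)) (children_a : List (String × Int)) (children_b : List (String × Int)) (out : Int) : Prop := out = calculate_union_1_alt graph children_a children_b
instance (graph : List (String × Int)) (children_a : List (String × Int)) (children_b : List (String × Int)) (out : Int) : Decidable (Spec_calculate_union_1 graph children_a children_b out) := by unfold Spec_calculate_union_1; infer_instance

-- ===== CLAIM (what is proved, stated in full; the proofs are below) =====
def Claim_equal_calculate_union_1 : Prop := ∀ (graph : List (String × Int)) (children_a : List (String × Int)) (children_b : List (String × Int)), Dom_calculate_union_1 graph children_a children_b → Spec_calculate_union_1 graph children_a children_b (calculate_union_1 graph children_a children_b)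

-- ===== LEMMAS AND PROOFS =====


theorem pv_union_sum_eq (KA KB : List String) (f g : String → Int)
    (hA : KA.Nodup) (hB : KB.Nodup) :
    ((PySem.Set.union (PySem.Set.ofList KA) KB).foldl (fun t k =>
       if k ∈ KA then (if k ∈ KB then t + max (f k) (g k) else t + f k) else t + g k) 0)
    = (KA.foldl (fun u i => u + f i) 0) + (KB.foldl (fun u i => u + g i) 0)
      - (KA.foldl (fun inter i => if i ∈ KB then (if f i < g i then inter + f i else inter + g i) else inter) 0) := by
  have hU : (PySem.Set.union (PySem.Set.ofList KA) KB).Nodup :=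
    PySem.Set.nodup_union _ _ (PySem.Set.nodup_ofList _)
  have hUt : (PySem.Set.union (PySem.Set.ofList KA) KB).toFinset = KA.toFinset ∪ KB.toFinset := by
    ext x
    simp [PySem.Set.mem_union, PySem.Set.mem_ofList]
  have e1 : (fun (t : Int) k => if k ∈ KA then (if k ∈ KB then t + max (f k) (g k) else t + f k) else t + g k)
      = (fun (t : Int) k => t + (if k ∈ KA then (if k ∈ KB then max (f k) (g k) else f k) else g k)) := by
    funext t k; split_ifs <;> rfl
  have e2 : (fun (inter : Int) i => if i ∈ KB then (if f i < g i then inter + f i else inter + g i) else inter)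
      = (fun (inter : Int) i => inter + (if i ∈ KB then min (f i) (g i) else 0)) := by
    funext inter i; split_ifs <;> omega
  rw [e1, e2, PySem.List.foldl_add, PySem.List.foldl_add, PySem.List.foldl_add,
      PySem.List.foldl_add, zero_add, zero_add, zero_add, zero_add,
      ← List.sum_toFinset _ hA, ← List.sum_toFinset _ hB, ← List.sum_toFinset _ hA,
      ← List.sum_toFinset _ hU, hUt]
  have hc : ∀ x ∈ KA.toFinset ∪ KB.toFinset,
      (if x ∈ KA then (if x ∈ KB then max (f x) (g x) else f x) else g x)
      = ((if x ∈ KA.toFinset then f x else 0) + (if x ∈ KB.toFinset then g x else 0)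
          - (if x ∈ KA.toFinset ∩ KB.toFinset then min (f x) (g x) else 0)) := by
    intro x hx
    simp only [Finset.mem_union, List.mem_toFinset] at hx
    simp only [Finset.mem_inter, List.mem_toFinset]
    rcases hx with h1 | h2
    · by_cases h2 : x ∈ KB <;> simp [h1, h2] <;> omega
    · by_cases h1 : x ∈ KA <;> simp [h1, h2] <;> omega
  rw [Finset.sum_congr rfl hc, Finset.sum_sub_distrib, Finset.sum_add_distrib,
      Finset.sum_ite_mem, Finset.sum_ite_mem, Finset.sum_ite_mem,
      Finset.union_inter_cancel_left, Finset.union_inter_cancel_right,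
      Finset.inter_eq_right.mpr (Finset.inter_subset_left.trans Finset.subset_union_left)]
  have hc2 : ∀ x ∈ KA.toFinset, (if x ∈ KB then min (f x) (g x) else 0)
      = (if x ∈ KB.toFinset then min (f x) (g x) else 0) := by
    intro x _; simp [List.mem_toFinset]
  rw [Finset.sum_congr rfl hc2, Finset.sum_ite_mem]

-- ===== VERDICT (by name: the statement is the Claim_ definition above) =====
theorem calculate_union_1_spec : Claim_equal_calculate_union_1 := by
  intro graph children_a children_b _
  unfold Spec_calculate_union_1 calculate_union_1 calculate_union_1_alt calculate_intersection
  simp only [PySem.Dict.contains_eq_decide_mem_keys, decide_eq_true_eq]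
  exact (pv_union_sum_eq _ _ _ _ (PySem.Dict.nodup_keys_ofList _) (PySem.Dict.nodup_keys_ofList _)).symm
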